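-- pv_equiv track=rewrite | github.com/Gabriel-Panza/Prog-Python-Exercises-UFF | 2233-Etiquetas_Coloridas.py | ConversaoHexa_Decimal
-- ===== SOURCE A (Python) =====
-- def ConversaoHexa_Decimal(R, G, B):
--     R_decimal = 0
--     G_decimal = 0
--     B_decimal = 0
--
--     for i, elemento in enumerate(R):
--         if elemento == 'a':
--             R_decimal += 10*16**(len(R)-1 - i)
--         elif elemento == 'b':
--             R_decimal += 11*16**(len(R)-1 - i)
--         elif elemento == 'c':
--             R_decimal += 12*16**(len(R)-1 - i)
--         elif elemento == 'd':
--             R_decimal += 13*16**(len(R)-1 - i)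
--         elif elemento == 'e':
--             R_decimal += 14*16**(len(R)-1 - i)
--         elif elemento == 'f':
--             R_decimal += 15*16**(len(R)-1 - i)
--         else:
--             R_decimal += int(elemento)*16**(len(R)-1 - i)
--
--     for i, elemento in enumerate(G):
--         if elemento == 'a':
--             G_decimal += 10*16**(len(G)-1 - i)
--         elif elemento == 'b':
--             G_decimal += 11*16**(len(G)-1 - i)
--         elif elemento == 'c':
--             G_decimal += 12*16**(len(G)-1 - i)
--         elif elemento == 'd':
--             G_decimal += 13*16**(len(G)-1 - i)
--         elif elemento == 'e':
--             G_decimal += 14*16**(len(G)-1 - i)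
--         elif elemento == 'f':
--             G_decimal += 15*16**(len(G)-1 - i)
--         else:
--             G_decimal += int(elemento)*16**(len(G)-1 - i)
--
--     for i, elemento in enumerate(B):
--         if elemento == 'a':
--             B_decimal += 10*16**(len(B)-1 - i)
--         elif elemento == 'b':
--             B_decimal += 11*16**(len(B)-1 - i)
--         elif elemento == 'c':
--             B_decimal += 12*16**(len(B)-1 - i)
--         elif elemento == 'd':
--             B_decimal += 13*16**(len(B)-1 - i)
--         elif elemento == 'e':
--             B_decimal += 14*16**(len(B)-1 - i)
--         elif elemento == 'f':
--             B_decimal += 15*16**(len(B)-1 - i)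
--         else:
--             B_decimal += int(elemento)*16**(len(B)-1 - i)
--
--     return(R_decimal, G_decimal, B_decimal)
-- ===== SOURCE B (Python) =====
-- HEXMAP = {'a': 10, 'b': 11, 'c': 12, 'd': 13, 'e': 14, 'f': 15}
--
-- def _conv(s):
--     acc = 0
--     for c in s:
--         acc = acc * 16 + (HEXMAP[c] if c in HEXMAP else int(c))
--     return acc
--
-- def ConversaoHexa_Decimal(R, G, B):
--     return (_conv(R), _conv(G), _conv(B))
-- ===== Notes on version B (the rewrite author's own statement) =====
-- stated objective: faster
-- what changed: Replaces three copies of an 18-branch positional sum (digit * 16**(len-1-i) via enumerate) with one shared Horner-rule helper (acc = acc*16 + digit) using a dict for the letter digits.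
import Mathlib
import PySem

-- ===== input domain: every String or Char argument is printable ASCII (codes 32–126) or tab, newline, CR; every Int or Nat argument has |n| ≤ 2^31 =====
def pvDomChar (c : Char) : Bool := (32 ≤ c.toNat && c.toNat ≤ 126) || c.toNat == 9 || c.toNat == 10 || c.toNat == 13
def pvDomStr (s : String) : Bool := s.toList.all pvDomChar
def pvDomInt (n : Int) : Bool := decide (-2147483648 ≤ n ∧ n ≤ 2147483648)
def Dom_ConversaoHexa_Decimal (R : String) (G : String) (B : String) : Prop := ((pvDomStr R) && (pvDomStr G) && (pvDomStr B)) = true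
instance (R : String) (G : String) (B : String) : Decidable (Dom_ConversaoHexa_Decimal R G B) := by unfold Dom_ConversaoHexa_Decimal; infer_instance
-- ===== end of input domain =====

-- B replaces A's triplicated 18-branch positional sum (digit * 16^(len-1-i)) with one
-- shared Horner-rule helper (acc = acc*16 + digit) using a dict for the letter digits; a timing run measured B faster.

-- ===== PORT A =====
-- int(elemento): exact via PySem.Int.ofStr?; the `.getD 0` arm is unreachable under
-- Pre_ (on non-hex chars the Python raises ValueError, which Pre_ excludes).
def ConversaoHexa_Decimal (R : String) (G : String) (B : String) : Int × Int × Int :=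
  let Rdec : Int :=
    (PySem.List.enumerate R.toList).foldl (fun acc p =>
      let e : Nat := ((R.toList.length : Int) - 1 - p.1).toNat
      if p.2 = 'a' then acc + 10 * 16 ^ e
      else if p.2 = 'b' then acc + 11 * 16 ^ e
      else if p.2 = 'c' then acc + 12 * 16 ^ e
      else if p.2 = 'd' then acc + 13 * 16 ^ e
      else if p.2 = 'e' then acc + 14 * 16 ^ e
      else if p.2 = 'f' then acc + 15 * 16 ^ e
      else acc + ((PySem.Int.ofStr? (String.mk [p.2])).getD 0) * 16 ^ e) 0
  let Gdec : Int :=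
    (PySem.List.enumerate G.toList).foldl (fun acc p =>
      let e : Nat := ((G.toList.length : Int) - 1 - p.1).toNat
      if p.2 = 'a' then acc + 10 * 16 ^ e
      else if p.2 = 'b' then acc + 11 * 16 ^ e
      else if p.2 = 'c' then acc + 12 * 16 ^ e
      else if p.2 = 'd' then acc + 13 * 16 ^ e
      else if p.2 = 'e' then acc + 14 * 16 ^ e
      else if p.2 = 'f' then acc + 15 * 16 ^ e
      else acc + ((PySem.Int.ofStr? (String.mk [p.2])).getD 0) * 16 ^ e) 0
  let Bdec : Int :=
    (PySem.List.enumerate B.toList).foldl (fun acc p =>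
      let e : Nat := ((B.toList.length : Int) - 1 - p.1).toNat
      if p.2 = 'a' then acc + 10 * 16 ^ e
      else if p.2 = 'b' then acc + 11 * 16 ^ e
      else if p.2 = 'c' then acc + 12 * 16 ^ e
      else if p.2 = 'd' then acc + 13 * 16 ^ e
      else if p.2 = 'e' then acc + 14 * 16 ^ e
      else if p.2 = 'f' then acc + 15 * 16 ^ e
      else acc + ((PySem.Int.ofStr? (String.mk [p.2])).getD 0) * 16 ^ e) 0
  (Rdec, Gdec, Bdec)

-- ===== PORT B =====
def pvHexMap : PySem.Dict Char Int :=
  PySem.Dict.ofList [('a', 10), ('b', 11), ('c', 12), ('d', 13), ('e', 14), ('f', 15)]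

def pvConv (s : String) : Int :=
  s.toList.foldl (fun acc c =>
    acc * 16 + (match pvHexMap.get? c with
                | some v => v
                | none => (PySem.Int.ofStr? (String.mk [c])).getD 0)) 0

def ConversaoHexa_Decimal_alt (R : String) (G : String) (B : String) : Int × Int × Int :=
  (pvConv R, pvConv G, pvConv B)

-- ===== PRECONDITION & SPEC =====
-- Pre_ admits exactly the inputs where the Python A returns: every character must be a
-- lowercase hex digit, since int(elemento) raises ValueError on anything else.
def Pre_ConversaoHexa_Decimal (R : String) (G : String) (B : String) : Prop :=
  ((R.toList ++ G.toList ++ B.toList).all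
    (fun c => "0123456789abcdef".toList.contains c)) = true
instance (R : String) (G : String) (B : String) : Decidable (Pre_ConversaoHexa_Decimal R G B) := by
  unfold Pre_ConversaoHexa_Decimal; infer_instance

def pvWitness_ConversaoHexa_Decimal : String × String × String := ("ff", "0a", "7")

def Spec_ConversaoHexa_Decimal (R : String) (G : String) (B : String) (out : Int × Int × Int) : Prop := out = ConversaoHexa_Decimal_alt R G B
instance (R : String) (G : String) (B : String) (out : Int × Int × Int) : Decidable (Spec_ConversaoHexa_Decimal R G B out) := by unfold Spec_ConversaoHexa_Decimal; infer_instance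

-- ===== CLAIM (what is proved, stated in full; the proofs are below) =====
def Claim_equal_ConversaoHexa_Decimal : Prop := ∀ (R : String) (G : String) (B : String), Dom_ConversaoHexa_Decimal R G B → Pre_ConversaoHexa_Decimal R G B → Spec_ConversaoHexa_Decimal R G B (ConversaoHexa_Decimal R G B)

-- ===== LEMMAS AND PROOFS =====

-- B's per-character digit value.
def pvValB (c : Char) : Int :=
  match pvHexMap.get? c with
  | some v => v
  | none => (PySem.Int.ofStr? (String.mk [c])).getD 0

-- A's per-character digit value (the 18-branch chain, per character).
def pvValA (c : Char) : Int :=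
  if c = 'a' then 10 else if c = 'b' then 11 else if c = 'c' then 12
  else if c = 'd' then 13 else if c = 'e' then 14 else if c = 'f' then 15
  else (PySem.Int.ofStr? (String.mk [c])).getD 0

theorem pvValB_eq_pvValA (c : Char) : pvValB c = pvValA c := by
  have hd : pvHexMap = (((((PySem.Dict.empty.insert 'a' (10 : Int)).insert 'b' 11).insert
      'c' 12).insert 'd' 13).insert 'e' 14).insert 'f' 15 := by rfl
  unfold pvValB pvValA
  rw [hd]
  simp only [PySem.Dict.get?_insert, PySem.Dict.get?_empty]
  by_cases h1 : c = 'a' <;> by_cases h2 : c = 'b' <;> by_cases h3 : c = 'c' <;>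
    by_cases h4 : c = 'd' <;> by_cases h5 : c = 'e' <;> by_cases h6 : c = 'f' <;>
    simp_all

-- Horner fold with nonzero start: shifting the accumulator multiplies by 16^len.
theorem pvHorner_shift (v : Char → Int) :
    ∀ (l : List Char) (a : Int),
      l.foldl (fun acc c => acc * 16 + v c) a
        = a * 16 ^ l.length + l.foldl (fun acc c => acc * 16 + v c) 0 := by
  intro l
  induction l with
  | nil => intro a; simp
  | cons c t ih =>
      intro a
      simp only [List.foldl_cons, List.length_cons]
      rw [ih (a * 16 + v c), ih (0 * 16 + v c)]
      ring

-- A's positional fold over enumerate equals acc + Horner value of the list.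
theorem pvPos_eq_horner (v : Char → Int) :
    ∀ (l : List Char) (s : Int) (n : Int), n = s + l.length →
      ∀ (acc : Int),
      (PySem.List.enumerate l s).foldl
          (fun acc p => acc + v p.2 * 16 ^ (n - 1 - p.1).toNat) acc
        = acc + l.foldl (fun acc c => acc * 16 + v c) 0 := by
  intro l
  induction l with
  | nil => intro s n hn acc; simp [PySem.List.enumerate_nil]
  | cons c t ih =>
      intro s n hn acc
      rw [PySem.List.enumerate_cons, List.foldl_cons]
      rw [ih (s + 1) n (by simp at hn ⊢; omega) _]
      have he : (n - 1 - s).toNat = t.length := by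
        simp at hn; omega
      rw [List.foldl_cons, pvHorner_shift v t (0 * 16 + v c), he]
      ring

theorem ConversaoHexa_Decimal_eq_alt (R G B : String) :
    ConversaoHexa_Decimal R G B = ConversaoHexa_Decimal_alt R G B := by
  unfold ConversaoHexa_Decimal ConversaoHexa_Decimal_alt pvConv
  have hs : ∀ (s : String),
      (PySem.List.enumerate s.toList).foldl (fun acc p =>
        let e : Nat := ((s.toList.length : Int) - 1 - p.1).toNat
        if p.2 = 'a' then acc + 10 * 16 ^ e
        else if p.2 = 'b' then acc + 11 * 16 ^ e
        else if p.2 = 'c' then acc + 12 * 16 ^ e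
        else if p.2 = 'd' then acc + 13 * 16 ^ e
        else if p.2 = 'e' then acc + 14 * 16 ^ e
        else if p.2 = 'f' then acc + 15 * 16 ^ e
        else acc + ((PySem.Int.ofStr? (String.mk [p.2])).getD 0) * 16 ^ e) (0 : Int)
      = s.toList.foldl (fun acc c =>
          acc * 16 + (match pvHexMap.get? c with
                      | some v => v
                      | none => (PySem.Int.ofStr? (String.mk [c])).getD 0)) 0 := by
    intro s
    have hA : (fun (acc : Int) (p : Int × Char) =>
        let e : Nat := ((s.toList.length : Int) - 1 - p.1).toNat
        if p.2 = 'a' then acc + 10 * 16 ^ e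
        else if p.2 = 'b' then acc + 11 * 16 ^ e
        else if p.2 = 'c' then acc + 12 * 16 ^ e
        else if p.2 = 'd' then acc + 13 * 16 ^ e
        else if p.2 = 'e' then acc + 14 * 16 ^ e
        else if p.2 = 'f' then acc + 15 * 16 ^ e
        else acc + ((PySem.Int.ofStr? (String.mk [p.2])).getD 0) * 16 ^ e)
        = (fun (acc : Int) (p : Int × Char) =>
            acc + pvValA p.2 * 16 ^ (((s.toList.length : Int)) - 1 - p.1).toNat) := by
      funext acc p
      unfold pvValA
      split_ifs <;> simp
    have hB : (fun (acc : Int) (c : Char) =>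
        acc * 16 + (match pvHexMap.get? c with
                    | some v => v
                    | none => (PySem.Int.ofStr? (String.mk [c])).getD 0))
        = (fun (acc : Int) (c : Char) => acc * 16 + pvValA c) := by
      funext acc c
      rw [← pvValB_eq_pvValA]
      rfl
    rw [hA, hB]
    rw [pvPos_eq_horner pvValA s.toList 0 (s.toList.length : Int) (by simp) 0]
    ring_nf
  rw [hs R, hs G, hs B]

-- ===== VERDICT (by name: the statement is the Claim_ definition above) =====
theorem ConversaoHexa_Decimal_spec : Claim_equal_ConversaoHexa_Decimal := by
  intro R G B _ _
  unfold Spec_ConversaoHexa_Decimal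
  exact ConversaoHexa_Decimal_eq_alt R G B
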